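-- pv_equiv track=rewrite | github.com/GinoHumberto/PythonEjecicios | Funciones/Ejercicio 1.1 tp 6.py | digitos_impares
-- ===== SOURCE A (Python) =====
-- def digitos_impares(numero):
--     iteracion = 0
--     impar = 0
--     while numero > 0:
--         digito = numero % 10
--         numero //= 10
--         iteracion += 1
--         for n in range(1, digito+1, 2):
--             if n == digito:
--                 impar += 1
--     if iteracion == impar:
--         return True
-- ===== SOURCE B (Python) =====
-- def digitos_impares(numero):
--     while numero > 0:
--         if numero % 10 % 2 == 0:
--             return
--         numero //= 10
--     return True
-- ===== Notes on version B (the rewrite author's own statement) =====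
-- stated objective: simpler
-- what changed: Replaced A's two-counter count-then-compare loop (with an inner range scan detecting oddness) with a short-circuiting while loop that returns immediately (bare return = None) on the first even digit and True once no digit remains; no counters are maintained.
import Mathlib
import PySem

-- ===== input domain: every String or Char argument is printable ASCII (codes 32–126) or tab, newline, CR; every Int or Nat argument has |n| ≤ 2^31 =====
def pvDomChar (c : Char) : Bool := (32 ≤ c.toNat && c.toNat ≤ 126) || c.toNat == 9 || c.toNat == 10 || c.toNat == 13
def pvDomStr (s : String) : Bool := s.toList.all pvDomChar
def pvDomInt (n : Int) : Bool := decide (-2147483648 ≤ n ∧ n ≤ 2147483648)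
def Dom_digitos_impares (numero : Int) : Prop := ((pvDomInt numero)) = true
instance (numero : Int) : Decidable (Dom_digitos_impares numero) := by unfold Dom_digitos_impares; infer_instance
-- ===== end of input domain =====

-- B replaces A's two-counter count-then-compare loop by a short-circuiting scan: simpler (objective: simpler).

-- termination measure helper (cited by decreasing_by of both loops)
theorem pvFdivTen_lt (n : Int) (h : 0 < n) :
    (PySem.Int.floordiv n 10).toNat < n.toNat := by
  rw [PySem.Int.floordiv_eq_ediv_of_pos (by norm_num)]
  omega

-- ===== PORT A =====
-- the while loop of A, carrying (iteracion, impar); inner for-loop is the literal fold over range(1, digito+1, 2)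
def digitosImparesLoopA (numero iteracion impar : Int) : Int × Int :=
  if h : numero > 0 then
    let digito := PySem.Int.mod numero 10
    let numero' := PySem.Int.floordiv numero 10
    let impar' := (PySem.List.pyRange 1 (digito + 1) 2).foldl
      (fun acc n => if n = digito then acc + 1 else acc) impar
    digitosImparesLoopA numero' (iteracion + 1) impar'
  else (iteracion, impar)
termination_by numero.toNat
decreasing_by exact pvFdivTen_lt numero h

def digitos_impares (numero : Int) : Option Bool :=
  let r := digitosImparesLoopA numero 0 0
  if r.1 = r.2 then some true else none

-- ===== PORT B =====
def digitos_impares_alt (numero : Int) : Option Bool :=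
  if h : numero > 0 then
    if PySem.Int.mod (PySem.Int.mod numero 10) 2 = 0 then none
    else digitos_impares_alt (PySem.Int.floordiv numero 10)
  else some true
termination_by numero.toNat
decreasing_by exact pvFdivTen_lt numero h

-- ===== PRECONDITION & SPEC =====
def Spec_digitos_impares (numero : Int) (out : Option Bool) : Prop := out = digitos_impares_alt numero
instance (numero : Int) (out : Option Bool) : Decidable (Spec_digitos_impares numero out) := by unfold Spec_digitos_impares; infer_instance

-- ===== CLAIM (what is proved, stated in full; the proofs are below) =====
def Claim_equal_digitos_impares : Prop := ∀ (numero : Int), Dom_digitos_impares numero → Spec_digitos_impares numero (digitos_impares numero)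

-- ===== LEMMAS AND PROOFS =====

-- the inner fold of A counts 1 exactly when the digit is odd
theorem pvFoldCount (d im : Int) (h0 : 0 ≤ d) (h9 : d < 10) :
    (PySem.List.pyRange 1 (d + 1) 2).foldl
      (fun acc n => if n = d then acc + 1 else acc) im
      = im + (if PySem.Int.mod d 2 = 0 then 0 else 1) := by
  interval_cases d <;> simp [PySem.List.pyRange, PySem.Int.mod, List.range_succ, Int.fmod]

-- B never returns `some false`
theorem pvBcases (numero : Int) :
    digitos_impares_alt numero = some true ∨ digitos_impares_alt numero = none := by
  induction numero using digitos_impares_alt.induct with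
  | case1 n h heven => right; rw [digitos_impares_alt, dif_pos h, if_pos heven]
  | case2 n h heven ih => rw [digitos_impares_alt, dif_pos h, if_neg heven]; exact ih
  | case3 n h => left; rw [digitos_impares_alt, dif_neg h]

-- the gap iteracion - impar of A's loop never shrinks
theorem pvGapGe (numero it im : Int) :
    it - im ≤ (digitosImparesLoopA numero it im).1 - (digitosImparesLoopA numero it im).2 := by
  rw [digitosImparesLoopA]
  split_ifs with h
  · have hm0 : (0:Int) ≤ PySem.Int.mod numero 10 := PySem.Int.mod_nonneg _ (by norm_num)
    have hm9 : PySem.Int.mod numero 10 < 10 := PySem.Int.mod_lt _ (by norm_num)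
    simp only
    rw [pvFoldCount _ _ hm0 hm9]
    have ih := pvGapGe (PySem.Int.floordiv numero 10) (it + 1)
      (im + if PySem.Int.mod (PySem.Int.mod numero 10) 2 = 0 then 0 else 1)
    split_ifs at ih ⊢ <;> omega
  · simp
termination_by numero.toNat
decreasing_by exact pvFdivTen_lt numero h

-- key invariant: the gap of A's loop result equals the initial gap iff B accepts
theorem pvKey (numero it im : Int) :
    (digitosImparesLoopA numero it im).1 - (digitosImparesLoopA numero it im).2 = it - im
      ↔ digitos_impares_alt numero = some true := by
  rw [digitosImparesLoopA, digitos_impares_alt]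
  split_ifs with h heven
  · have hm0 : (0:Int) ≤ PySem.Int.mod numero 10 := PySem.Int.mod_nonneg _ (by norm_num)
    have hm9 : PySem.Int.mod numero 10 < 10 := PySem.Int.mod_lt _ (by norm_num)
    simp only
    rw [pvFoldCount _ _ hm0 hm9, if_pos heven]
    have hge := pvGapGe (PySem.Int.floordiv numero 10) (it + 1) (im + 0)
    simp only [iff_false]
    omega
  · have hm0 : (0:Int) ≤ PySem.Int.mod numero 10 := PySem.Int.mod_nonneg _ (by norm_num)
    have hm9 : PySem.Int.mod numero 10 < 10 := PySem.Int.mod_lt _ (by norm_num)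
    simp only
    rw [pvFoldCount _ _ hm0 hm9, if_neg heven]
    rw [← pvKey (PySem.Int.floordiv numero 10) (it + 1) (im + 1)]
    constructor <;> intro <;> omega
  · simp
termination_by numero.toNat
decreasing_by exact pvFdivTen_lt numero h

-- ===== VERDICT (by name: the statement is the Claim_ definition above) =====
theorem digitos_impares_spec : Claim_equal_digitos_impares := by
  intro numero _
  unfold Spec_digitos_impares digitos_impares
  have hk := pvKey numero 0 0
  rcases pvBcases numero with hb | hb <;> rw [hb] <;> rw [hb] at hk
  · simp only [iff_true, sub_zero] at hk
    have : (digitosImparesLoopA numero 0 0).1 = (digitosImparesLoopA numero 0 0).2 := by omega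
    simp [this]
  · simp only [reduceCtorEq, iff_false, sub_zero] at hk
    have : ¬ (digitosImparesLoopA numero 0 0).1 = (digitosImparesLoopA numero 0 0).2 := by omega
    simp [this]
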